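-- pv_equiv track=rewrite | github.com/Diego-Roque/Algoritmos | codeforces/binarycut.py | min_cuts_to_sorted
-- ===== SOURCE A (Python) =====
-- def min_cuts_to_sorted(s):
--     # If string is already sorted (all 0s or all 1s)
--     if set(s) == {'0'} or set(s) == {'1'}:
--         return 1
--
--     # Count zeros and ones
--     zeros = s.count('0')
--     ones = len(s) - zeros
--
--     # Initialize minimum pieces to a large value
--     min_pieces = len(s)
--
--     # Try all possible ways to distribute zeros
--     for prefix_zeros in range(zeros + 1):
--         # Calculate the number of others needed
--         prefix_ones = zeros - prefix_zeros
--
--         # Check if this distribution is valid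
--         if prefix_ones <= ones:
--             # Count non-empty pieces
--             pieces = (1 if prefix_zeros > 0 else 0) + \
--                      (1 if prefix_ones > 0 else 0) + \
--                      (1 if zeros - prefix_zeros > 0 else 0) + \
--                      (1 if ones - prefix_ones > 0 else 0)
--
--             # Update minimum pieces
--             min_pieces = min(min_pieces, pieces)
--
--     return min_pieces
-- ===== SOURCE B (Python) =====
-- def min_cuts_to_sorted(s):
--     # Closed-form case analysis: the answer depends only on the counts of '0's
--     # and of other characters, never on the arrangement.
--     if not s:
--         return 0
--     zeros = s.count('0')
--     if zeros == 0 or zeros == len(s):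
--         return 1
--     return 2
-- ===== Notes on version B (the rewrite author's own statement) =====
-- stated objective: simpler
-- what changed: Replaced the set comparisons and the minimisation loop over all zero-distributions by a direct O(n) closed-form case analysis on the count of '0' characters (0 for empty, 1 if the string has no '0' or only '0's, else 2).
import Mathlib
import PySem

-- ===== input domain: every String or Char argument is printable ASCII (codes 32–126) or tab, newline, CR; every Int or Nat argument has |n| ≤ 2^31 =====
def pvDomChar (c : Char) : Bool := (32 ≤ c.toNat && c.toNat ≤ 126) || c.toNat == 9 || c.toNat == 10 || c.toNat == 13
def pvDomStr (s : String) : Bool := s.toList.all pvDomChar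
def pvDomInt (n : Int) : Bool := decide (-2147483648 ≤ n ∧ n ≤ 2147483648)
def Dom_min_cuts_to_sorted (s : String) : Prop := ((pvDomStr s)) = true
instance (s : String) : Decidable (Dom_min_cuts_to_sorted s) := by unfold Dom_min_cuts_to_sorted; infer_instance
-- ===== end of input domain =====

-- B replaces A's set comparisons and minimisation loop by a closed-form case analysis
-- on the count of '0' characters (objective: simpler).

-- ===== PORT A =====
def min_cuts_to_sorted (s : String) : Int :=
  -- if set(s) == {'0'} or set(s) == {'1'}: return 1
  if PySem.Set.equal (PySem.Set.ofList s.toList) (PySem.Set.ofList ['0']) ||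
     PySem.Set.equal (PySem.Set.ofList s.toList) (PySem.Set.ofList ['1']) then 1
  else
    let zeros : Int := (PySem.Str.count s "0" : Int)
    let ones : Int := PySem.Str.len s - zeros
    let min_pieces : Int := PySem.Str.len s
    (PySem.List.pyRange 0 (zeros + 1) 1).foldl (fun mp prefix_zeros =>
      let prefix_ones := zeros - prefix_zeros
      if prefix_ones ≤ ones then
        min mp ((if prefix_zeros > 0 then (1 : Int) else 0) +
                (if prefix_ones > 0 then 1 else 0) +
                (if zeros - prefix_zeros > 0 then 1 else 0) +
                (if ones - prefix_ones > 0 then 1 else 0))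
      else mp) min_pieces

-- ===== PORT B =====
def min_cuts_to_sorted_alt (s : String) : Int :=
  if PySem.Str.len s == 0 then 0
  else
    let zeros : Int := (PySem.Str.count s "0" : Int)
    if zeros == 0 || zeros == PySem.Str.len s then 1 else 2

-- ===== PRECONDITION & SPEC =====
def Spec_min_cuts_to_sorted (s : String) (out : Int) : Prop := out = min_cuts_to_sorted_alt s
instance (s : String) (out : Int) : Decidable (Spec_min_cuts_to_sorted s out) := by unfold Spec_min_cuts_to_sorted; infer_instance

-- ===== CLAIM (what is proved, stated in full; the proofs are below) =====
def Claim_equal_min_cuts_to_sorted : Prop := ∀ (s : String), Dom_min_cuts_to_sorted s → Spec_min_cuts_to_sorted s (min_cuts_to_sorted s)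

-- ===== LEMMAS AND PROOFS =====

-- Python's s.count('0') for a one-character pattern is plain character counting.
theorem chars_count_go_single (c : Char) (l : List Char) (fuel : Nat) (acc : Nat)
    (h : l.length ≤ fuel) :
    PySem.Chars.count.go [c] fuel l acc = acc + l.count c := by
  induction l generalizing fuel acc with
  | nil =>
    cases fuel <;> simp [PySem.Chars.count.go]
  | cons hd tl ih =>
    cases fuel with
    | zero => simp at h
    | succ f =>
      simp only [PySem.Chars.count.go]
      by_cases hc : hd = c
      · subst hc
        have hpre : [hd].isPrefixOf (hd :: tl) = true := by
          simp [List.isPrefixOf]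
        rw [if_pos hpre]
        simp only [List.length_cons] at h
        rw [show List.drop [hd].length (hd :: tl) = tl by simp]
        rw [ih f (acc + 1) (by omega)]
        simp [List.count_cons]; omega
      · have hpre : [c].isPrefixOf (hd :: tl) = false := by
          simp [List.isPrefixOf]
          exact fun h' => absurd h'.symm hc
        rw [if_neg (by simp [hpre])]
        simp only [List.length_cons] at h
        rw [ih f acc (by omega)]
        simp [hc]

theorem str_count_single (s : String) (c : Char) :
    PySem.Str.count s (String.ofList [c]) = s.toList.count c := by
  rw [PySem.Str.count_eq]
  have : (String.ofList [c]).toList = [c] := by simp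
  rw [this]
  unfold PySem.Chars.count
  simp only [List.isEmpty_cons]
  simpa using chars_count_go_single c s.toList s.toList.length 0 le_rfl

-- foldl with a guarded min can only decrease
theorem foldl_min_guard_le {α : Type} (l : List α) (c : α → Prop) [DecidablePred c]
    (f : α → Int) (init : Int) :
    l.foldl (fun a x => if c x then min a (f x) else a) init ≤ init := by
  induction l generalizing init with
  | nil => simp
  | cons hd tl ih =>
    simp only [List.foldl_cons]
    split_ifs with h
    · exact le_trans (ih _) (min_le_left _ _)
    · exact ih _

theorem foldl_min_guard_lb {α : Type} (l : List α) (c : α → Prop) [DecidablePred c]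
    (f : α → Int) (init k : Int) (hinit : k ≤ init)
    (hall : ∀ x ∈ l, c x → k ≤ f x) :
    k ≤ l.foldl (fun a x => if c x then min a (f x) else a) init := by
  induction l generalizing init with
  | nil => simpa
  | cons hd tl ih =>
    simp only [List.foldl_cons]
    split_ifs with h
    · exact ih _ (le_min hinit (hall hd (by simp) h))
        (fun x hx => hall x (by simp [hx]))
    · exact ih _ hinit (fun x hx => hall x (by simp [hx]))

theorem foldl_min_guard_eq {α : Type} (l : List α) (c : α → Prop) [DecidablePred c]
    (f : α → Int) (init k : Int) (hinit : k ≤ init)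
    (hall : ∀ x ∈ l, c x → k ≤ f x)
    (hex : ∃ x ∈ l, c x ∧ f x = k) :
    l.foldl (fun a x => if c x then min a (f x) else a) init = k := by
  refine le_antisymm ?_ (foldl_min_guard_lb l c f init k hinit hall)
  obtain ⟨x, hx, hcx, hfx⟩ := hex
  obtain ⟨l1, l2, rfl⟩ := List.append_of_mem hx
  rw [List.foldl_append, List.foldl_cons, if_pos hcx, hfx]
  exact le_trans (foldl_min_guard_le l2 c f _) (min_le_right _ _)

-- set(s) == {c} means: s is nonempty and every character of s is c
theorem set_equal_singleton (l : List Char) (c : Char) :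
    PySem.Set.equal (PySem.Set.ofList l) (PySem.Set.ofList [c]) = true ↔
      (l ≠ [] ∧ ∀ x ∈ l, x = c) := by
  rw [PySem.Set.equal_iff]
  constructor
  · intro h
    have hc : c ∈ l := by
      have := (h c).mpr (by simp [PySem.Set.mem_ofList])
      simpa [PySem.Set.mem_ofList] using this
    refine ⟨by rintro rfl; simp at hc, fun x hx => ?_⟩
    have := (h x).mp (by simpa [PySem.Set.mem_ofList] using hx)
    simpa [PySem.Set.mem_ofList] using this
  · rintro ⟨hne, hall⟩ x
    simp only [PySem.Set.mem_ofList, List.mem_singleton]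
    constructor
    · exact fun hx => hall x hx
    · rintro rfl
      obtain ⟨y, hy⟩ := List.exists_mem_of_ne_nil l hne
      exact (hall y hy) ▸ hy

-- characterize A via the character count z = l.count '0' and length n
theorem count_eq_length_iff_all (l : List Char) (c : Char) :
    l.count c = l.length ↔ ∀ x ∈ l, x = c := by
  rw [List.count_eq_length]
  constructor <;> exact fun h x hx => (h x hx).symm

-- ===== VERDICT (by name: the statement is the Claim_ definition above) =====
theorem min_cuts_to_sorted_spec : Claim_equal_min_cuts_to_sorted := by
  intro s _
  show min_cuts_to_sorted s = min_cuts_to_sorted_alt s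
  have hc0 : PySem.Str.count s "0" = s.toList.count '0' := by
    have h : ("0" : String) = String.ofList ['0'] := rfl
    rw [h, str_count_single]
  have hlen : PySem.Str.len s = (s.toList.length : Int) := by
    simp [PySem.Str.len_eq]
  unfold min_cuts_to_sorted min_cuts_to_sorted_alt
  rw [hc0, hlen]
  set l := s.toList with hl
  set z : Nat := l.count '0' with hz
  set n : Nat := l.length with hn
  have hzn : z ≤ n := List.count_le_length
  by_cases hnil : l = []
  · -- empty string: both return 0
    have hz0 : z = 0 := by rw [hz, hnil]; simp
    have hn0 : n = 0 := by rw [hn, hnil]; simp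
    rw [hnil, hz0, hn0]
    decide
  · -- nonempty
    have hn0 : 0 < n := by
      rw [hn]
      exact List.length_pos_iff.mpr hnil
    by_cases hall0 : ∀ x ∈ l, x = '0'
    · -- all characters are '0': A takes the set branch, B sees z = n
      have he : PySem.Set.equal (PySem.Set.ofList l) (PySem.Set.ofList ['0']) = true :=
        (set_equal_singleton l '0').mpr ⟨hnil, hall0⟩
      have hzeq : z = n := (count_eq_length_iff_all l '0').mpr hall0
      rw [he]
      simp only [Bool.true_or, if_true]
      have h1 : (((n:Int)) == 0) = false := by simp; omega
      simp [hzeq, h1]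
    · by_cases hz0 : z = 0
      · -- no '0' at all: B returns 1; A returns 1 through either the {'1'} branch or the loop
        have hB : (if ((n : Int)) == 0 then (0:Int) else if ((z : Int)) == 0 || ((z:Int)) == (n:Int) then 1 else 2) = 1 := by
          simp only [hz0]
          have h1 : (((n:Int)) == 0) = false := by simp; omega
          simp [h1]
        rw [hB]
        by_cases he1 : PySem.Set.equal (PySem.Set.ofList l) (PySem.Set.ofList ['1']) = true
        · rw [he1]; simp
        · have he0 : PySem.Set.equal (PySem.Set.ofList l) (PySem.Set.ofList ['0']) = false := by
            rw [Bool.eq_false_iff]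
            intro h
            exact hall0 ((set_equal_singleton l '0').mp h).2
          rw [he0, Bool.eq_false_iff.mpr he1]
          simp only [Bool.or_false]
          -- loop with zeros = 0: range(1) = [0], single iteration gives min n 1 = 1
          rw [hz0]
          simp only [Nat.cast_zero]
          rw [show PySem.List.pyRange 0 ((0:Int) + 1) 1 = [0] from by decide]
          simp only [List.foldl_cons, List.foldl_nil]
          split_ifs <;> omega
      · -- 0 < z < n: A's loop minimum is 2, B returns 2
        have hzltn : z < n := by
          rcases lt_or_eq_of_le hzn with h | h
          · exact h
          · exact absurd ((count_eq_length_iff_all l '0').mp h) hall0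
        have hmem0 : '0' ∈ l := List.count_pos_iff.mp (by omega)
        have he0 : PySem.Set.equal (PySem.Set.ofList l) (PySem.Set.ofList ['0']) = false := by
          rw [Bool.eq_false_iff]
          intro h
          exact hall0 ((set_equal_singleton l '0').mp h).2
        have he1 : PySem.Set.equal (PySem.Set.ofList l) (PySem.Set.ofList ['1']) = false := by
          rw [Bool.eq_false_iff]
          intro h
          have := ((set_equal_singleton l '1').mp h).2 '0' hmem0
          exact absurd this (by decide)
        rw [he0, he1]
        simp only [Bool.or_false]
        have hB : (if ((n : Int)) == 0 then (0:Int) else if ((z : Int)) == 0 || ((z:Int)) == (n:Int) then 1 else 2) = 2 := by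
          have h1 : (((n:Int)) == 0) = false := by simp; omega
          have h2 : (((z:Int)) == 0) = false := by simp; omega
          have h3 : (((z:Int)) == ((n:Int))) = false := by simp; omega
          simp [h1, h2, h3]
        rw [hB]
        have hones : (0:Int) < (n : Int) - (z : Int) := by omega
        refine foldl_min_guard_eq (PySem.List.pyRange 0 ((z:Int) + 1) 1)
          (fun pz => (z:Int) - pz ≤ (n:Int) - (z:Int))
          (fun pz => (if pz > 0 then (1 : Int) else 0) +
                (if (z:Int) - pz > 0 then 1 else 0) +
                (if (z:Int) - pz > 0 then 1 else 0) +
                (if ((n:Int) - (z:Int)) - ((z:Int) - pz) > 0 then 1 else 0))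
          ((n : Int)) 2 (by omega) ?_ ?_
        · intro pz hmem hcond
          rw [PySem.List.mem_pyRange_one] at hmem
          dsimp only
          split_ifs <;> omega
        · refine ⟨(z : Int), ?_, by omega, ?_⟩
          · rw [PySem.List.mem_pyRange_one]; omega
          · dsimp only
            split_ifs <;> omega
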